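-- pv_equiv track=rewrite | github.com/lugoues/beets-lyrics | beetsplug/lyrics/engines/engine_google.py | findNextTag
-- ===== SOURCE A (Python) =====
-- def findNextTag(text):
-- 	index=len(text)
-- 	tags=["ar","ti","al","by","la","offset"]
-- 	for tag in tags:
-- 		pos=text.lower().find(" "+tag)
-- 		if pos != -1 and pos < index:
-- 			index=pos
-- 	return index
-- ===== SOURCE B (Python) =====
-- def findNextTag(text):
--     low = text.lower()
--     i = 0
--     for ch in low:
--         if ch == ' ' and any(low.startswith(t, i + 1) for t in ("ar", "ti", "al", "by", "la", "offset")):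
--             return i
--         i += 1
--     return i
-- ===== Notes on version B (the rewrite author's own statement) =====
-- stated objective: alternative
-- what changed: Replaces six independent full-text str.find passes (one per tag, keeping the minimum) with a single left-to-right scan that stops at the first position where a space is followed by any of the tags.
import Mathlib
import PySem

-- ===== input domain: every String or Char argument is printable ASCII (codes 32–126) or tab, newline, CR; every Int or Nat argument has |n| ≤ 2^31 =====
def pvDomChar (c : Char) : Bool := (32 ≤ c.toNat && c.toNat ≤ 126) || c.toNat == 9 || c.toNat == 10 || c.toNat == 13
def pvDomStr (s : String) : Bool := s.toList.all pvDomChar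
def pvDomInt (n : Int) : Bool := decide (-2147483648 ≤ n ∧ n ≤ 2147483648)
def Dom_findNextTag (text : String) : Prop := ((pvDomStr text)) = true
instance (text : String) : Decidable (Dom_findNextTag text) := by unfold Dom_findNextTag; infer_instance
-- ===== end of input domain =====

-- B replaces six independent full-text str.find passes by one left-to-right scan that
-- stops at the first position where a space is followed by any tag (objective: alternative).

-- ===== PORT A =====
def findNextTag (text : String) : Int :=
  let index : Int := PySem.Str.len text
  let tags : List String := ["ar", "ti", "al", "by", "la", "offset"]
  tags.foldl (fun index tag =>
    let pos := PySem.Str.find (PySem.Str.lower text) (" " ++ tag)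
    if pos ≠ -1 ∧ pos < index then pos else index) index

-- ===== PORT B =====
def bTags : List (List Char) :=
  [['a','r'], ['t','i'], ['a','l'], ['b','y'], ['l','a'], ['o','f','f','s','e','t']]

def altGo : List Char → Int → Int
  | [], i => i
  | c :: rest, i =>
    if c = ' ' ∧ bTags.any (fun t => t.isPrefixOf rest) then i
    else altGo rest (i + 1)

def findNextTag_alt (text : String) : Int :=
  altGo (PySem.Str.lower text).toList 0

-- ===== PRECONDITION & SPEC =====
def Spec_findNextTag (text : String) (out : Int) : Prop := out = findNextTag_alt text
instance (text : String) (out : Int) : Decidable (Spec_findNextTag text out) := by unfold Spec_findNextTag; infer_instance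

-- ===== CLAIM (what is proved, stated in full; the proofs are below) =====
def Claim_equal_findNextTag : Prop := ∀ (text : String), Dom_findNextTag text → Spec_findNextTag text (findNextTag text)

-- ===== LEMMAS AND PROOFS =====

-- "a space followed by some tag occurs at the head of l"
def MatchAt (l : List Char) : Prop := ∃ t ∈ bTags, (' ' :: t) <+: l

theorem matchAt_cons {c : Char} {rest : List Char} :
    MatchAt (c :: rest) ↔ (c = ' ' ∧ bTags.any (fun t => t.isPrefixOf rest) = true) := by
  unfold MatchAt
  constructor
  · rintro ⟨t, ht, hpre⟩
    rw [List.cons_prefix_cons] at hpre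
    exact ⟨hpre.1.symm, List.any_eq_true.2 ⟨t, ht, List.isPrefixOf_iff_prefix.2 hpre.2⟩⟩
  · rintro ⟨hc, hany⟩
    obtain ⟨t, ht, hpre⟩ := List.any_eq_true.1 hany
    exact ⟨t, ht, List.cons_prefix_cons.2 ⟨hc.symm, List.isPrefixOf_iff_prefix.1 hpre⟩⟩

theorem matchAt_nil : ¬ MatchAt [] := by
  rintro ⟨t, _, hpre⟩
  simpa using hpre.length_le

-- characterization of B's scan
theorem altGo_spec (l : List Char) (i : Int) :
    (altGo l i = i + l.length ∧ ∀ j, ¬ MatchAt (l.drop j)) ∨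
    (∃ n : Nat, altGo l i = i + n ∧ n < l.length ∧ MatchAt (l.drop n) ∧
      ∀ j < n, ¬ MatchAt (l.drop j)) := by
  induction l generalizing i with
  | nil =>
    left
    refine ⟨by simp [altGo], fun j => by simpa using matchAt_nil⟩
  | cons c rest ih =>
    by_cases h : MatchAt (c :: rest)
    · right
      refine ⟨0, ?_, by simp, by simpa using h, by omega⟩
      have hb := matchAt_cons.1 h
      simp [altGo, hb.1, hb.2]
    · have hstep : altGo (c :: rest) i = altGo rest (i + 1) := by
        rw [matchAt_cons] at h
        push_neg at h
        by_cases hc : c = ' '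
        · simp [altGo, hc, h hc]
        · simp [altGo, hc]
      rcases ih (i + 1) with ⟨heq, hnm⟩ | ⟨n, heq, hlt, hm, hmin⟩
      · left
        refine ⟨by rw [hstep, heq]; simp only [List.length_cons]; push_cast; ring, fun j => ?_⟩
        cases j with
        | zero => simpa using h
        | succ j => simpa using hnm j
      · right
        refine ⟨n + 1, ?_, by simpa using Nat.succ_lt_succ hlt, by simpa using hm, ?_⟩
        · rw [hstep, heq]; push_cast; ring
        · intro j hj
          cases j with
          | zero => simpa using h
          | succ j => simpa using hmin j (by omega)

-- A's fold, phrased on the lowered character list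
def foldA (s : List Char) (ts : List (List Char)) (acc : Int) : Int :=
  ts.foldl (fun idx t =>
    let pos := PySem.Chars.find s (' ' :: t)
    if pos ≠ -1 ∧ pos < idx then pos else idx) acc

theorem foldA_le_acc (s : List Char) (ts : List (List Char)) (acc : Int) :
    foldA s ts acc ≤ acc := by
  induction ts generalizing acc with
  | nil => simp [foldA]
  | cons t ts ih =>
    simp only [foldA, List.foldl]
    split_ifs with h
    · exact le_trans (ih _) (le_of_lt h.2)
    · exact ih acc

theorem foldA_le_find (s : List Char) (ts : List (List Char)) (acc : Int)
    {t : List Char} (ht : t ∈ ts) (hf : PySem.Chars.find s (' ' :: t) ≠ -1) :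
    foldA s ts acc ≤ PySem.Chars.find s (' ' :: t) := by
  induction ts generalizing acc with
  | nil => cases ht
  | cons u ts ih =>
    rcases List.mem_cons.1 ht with rfl | hmem
    · simp only [foldA, List.foldl]
      split_ifs with h
      · exact foldA_le_acc s ts _
      · push_neg at h
        exact le_trans (foldA_le_acc s ts acc) (h hf)
    · simp only [foldA, List.foldl]
      split_ifs <;> exact ih _ hmem

theorem foldA_cases (s : List Char) (ts : List (List Char)) (acc : Int) :
    foldA s ts acc = acc ∨
    ∃ t ∈ ts, PySem.Chars.find s (' ' :: t) ≠ -1 ∧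
      foldA s ts acc = PySem.Chars.find s (' ' :: t) := by
  induction ts generalizing acc with
  | nil => left; simp [foldA]
  | cons u ts ih =>
    simp only [foldA, List.foldl]
    split_ifs with h
    · rcases ih (PySem.Chars.find s (' ' :: u)) with heq | ⟨t, ht, hf, heq⟩
      · exact Or.inr ⟨u, List.mem_cons_self, h.1, heq⟩
      · exact Or.inr ⟨t, List.mem_cons_of_mem _ ht, hf, heq⟩
    · rcases ih acc with heq | ⟨t, ht, hf, heq⟩
      · exact Or.inl heq
      · exact Or.inr ⟨t, List.mem_cons_of_mem _ ht, hf, heq⟩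

-- the A port unfolded to foldA on the lowered list
theorem findNextTag_eq_foldA (text : String) :
    findNextTag text = foldA (PySem.Chars.lower text.toList) bTags (text.toList.length) := by
  simp only [findNextTag, foldA, bTags, List.foldl, PySem.Str.find_eq,
    PySem.Str.toList_lower, PySem.Str.len,
    show (" " ++ "ar").toList = [' ','a','r'] from rfl,
    show (" " ++ "ti").toList = [' ','t','i'] from rfl,
    show (" " ++ "al").toList = [' ','a','l'] from rfl,
    show (" " ++ "by").toList = [' ','b','y'] from rfl,
    show (" " ++ "la").toList = [' ','l','a'] from rfl,
    show (" " ++ "offset").toList = [' ','o','f','f','s','e','t'] from rfl,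
    show ∀ s : String, s.length = s.toList.length from fun _ => rfl]

-- find ≠ -1 iff some drop has the pattern as a prefix
theorem find_ne_iff_exists (s t : List Char) :
    PySem.Chars.find s (' ' :: t) ≠ -1 ↔ ∃ j, (' ' :: t) <+: s.drop j := by
  rw [PySem.Chars.find_ne_neg_one_iff, ← PySem.Chars.isIn_iff_infix,
    ← PySem.Chars.exists_prefix_drop_iff_isIn]

-- ===== VERDICT (by name: the statement is the Claim_ definition above) =====
theorem findNextTag_spec : Claim_equal_findNextTag := by
  intro text _
  unfold Spec_findNextTag findNextTag_alt
  rw [findNextTag_eq_foldA, PySem.Str.toList_lower]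
  set s := PySem.Chars.lower text.toList with hs
  have hslen : s.length = text.toList.length := by
    simp [hs, PySem.Chars.lower]
  rcases altGo_spec s 0 with ⟨heq, hnm⟩ | ⟨n, heq, hlt, hm, hmin⟩
  · -- no match anywhere: every find is -1, fold keeps the length
    rw [heq]
    rcases foldA_cases s bTags (text.toList.length) with hA | ⟨t, _, hf, _⟩
    · rw [hA]; simp [hslen]
    · obtain ⟨j, hj⟩ := (find_ne_iff_exists s t).1 hf
      exact absurd ⟨t, by assumption, hj⟩ (hnm j)
  · -- first match at n
    rw [heq]
    obtain ⟨t, ht, hpre⟩ := hm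
    have hf : PySem.Chars.find s (' ' :: t) ≠ -1 :=
      (find_ne_iff_exists s t).2 ⟨n, hpre⟩
    have hpos : 0 ≤ PySem.Chars.find s (' ' :: t) := by
      rcases lt_or_eq_of_le (PySem.Chars.neg_one_le_find s (' ' :: t)) with h | h
      · omega
      · exact absurd h.symm hf
    have hspec := PySem.Chars.find_spec (s := s) (sub := ' ' :: t) hpos
    -- find t ≤ n
    have hfind_le : PySem.Chars.find s (' ' :: t) ≤ (n : Int) := by
      by_contra hgt
      push_neg at hgt
      exact hspec.2 n (by omega) hpre
    have hub : foldA s bTags (text.toList.length) ≤ (n : Int) :=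
      le_trans (foldA_le_find s bTags _ ht hf) hfind_le
    rcases foldA_cases s bTags (text.toList.length) with hA | ⟨u, hu, hfu, hAu⟩
    · exfalso
      rw [hA] at hub
      omega
    · -- foldA = find u; show n ≤ find u
      have hposu : 0 ≤ PySem.Chars.find s (' ' :: u) := by
        rcases lt_or_eq_of_le (PySem.Chars.neg_one_le_find s (' ' :: u)) with h | h
        · omega
        · exact absurd h.symm hfu
      have hspecu := PySem.Chars.find_spec (s := s) (sub := ' ' :: u) hposu
      have hmu : MatchAt (s.drop (PySem.Chars.find s (' ' :: u)).toNat) :=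
        ⟨u, hu, hspecu.1⟩
      have hn_le : n ≤ (PySem.Chars.find s (' ' :: u)).toNat := by
        by_contra hgt
        push_neg at hgt
        exact hmin _ hgt hmu
      rw [hAu]
      omega
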